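-- pv_equiv track=rewrite | github.com/TJN25/PredVirusHost | src/predvirushost/utils/ProcessResults.py | remove_unwanted_characters
-- ===== SOURCE A (Python) =====
-- def remove_unwanted_characters(genome) -> str:
--     closing_strings = ['[]', '{}', '()', '"', "''", '<>', '`']
--     for item in closing_strings:
--         if len(item) == 1:
--             count = genome.count(item)
--             if count % 2 == 1:
--                 genome = genome.replace(item, '')
--         else:
--             open_count = genome.count(item[0])
--             close_count = genome.count(item[1])
--             if open_count != close_count:
--                 genome = genome.replace(item[0], '').replace(item[1], '')
--     return genome
-- ===== SOURCE B (Python) =====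
-- def remove_unwanted_characters(genome) -> str:
--     # One pass to build a character-count table, then one removal pass.
--     counts = {}
--     for ch in genome:
--         counts[ch] = counts.get(ch, 0) + 1
--     delete = set()
--     for a, b in ('[]', '{}', '()', '<>'):
--         if counts.get(a, 0) != counts.get(b, 0):
--             delete.add(a)
--             delete.add(b)
--     for q in '"`':
--         if counts.get(q, 0) % 2 == 1:
--             delete.add(q)
--     return ''.join(ch for ch in genome if ch not in delete)
-- ===== Notes on version B (the rewrite author's own statement) =====
-- stated objective: simpler
-- what changed: A makes seven sequential count/replace scans over the (repeatedly rebuilt) string; B builds one character-count table, derives the set of characters to delete from the fixed rules, and removes them in a single filtering pass (valid because the special characters are pairwise distinct, so A's later counts equal counts on the original string).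
import Mathlib
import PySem

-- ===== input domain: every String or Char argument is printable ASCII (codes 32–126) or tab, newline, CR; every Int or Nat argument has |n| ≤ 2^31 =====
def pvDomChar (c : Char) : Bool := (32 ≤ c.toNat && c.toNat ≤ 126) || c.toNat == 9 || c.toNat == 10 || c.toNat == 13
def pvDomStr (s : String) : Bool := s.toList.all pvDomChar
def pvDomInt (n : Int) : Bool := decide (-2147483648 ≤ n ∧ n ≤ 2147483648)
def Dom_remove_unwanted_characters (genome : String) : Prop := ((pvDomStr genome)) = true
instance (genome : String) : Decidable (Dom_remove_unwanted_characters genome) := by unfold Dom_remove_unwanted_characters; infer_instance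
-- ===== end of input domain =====

-- B replaces A's seven interleaved count/replace scans by one count table and one removal pass (objective: simpler).

-- ===== PORT A =====
def pvClosingStrings : List (List Char) :=
  [['[', ']'], ['{', '}'], ['(', ')'], ['"'], ['\'', '\''], ['<', '>'], ['`']]

def pvStepA (g : List Char) (item : List Char) : List Char :=
  if item.length = 1 then
    if PySem.Chars.count g item % 2 = 1 then PySem.Chars.replace g item [] else g
  else
    let c0 := PySem.List.pyGetD item 0 ' '
    let c1 := PySem.List.pyGetD item 1 ' '
    if PySem.Chars.count g [c0] ≠ PySem.Chars.count g [c1] then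
      PySem.Chars.replace (PySem.Chars.replace g [c0] []) [c1] []
    else g

def remove_unwanted_characters (genome : String) : String :=
  String.ofList (pvClosingStrings.foldl pvStepA genome.toList)

-- ===== PORT B =====
def pvCounts (g : List Char) : PySem.Dict Char Int :=
  g.foldl (fun d x => d.insert x (d.getD x 0 + 1)) PySem.Dict.empty

def pvDelete (counts : PySem.Dict Char Int) : List Char :=
  let s1 := ([('[', ']'), ('{', '}'), ('(', ')'), ('<', '>')]).foldl
    (fun s p => if counts.getD p.1 0 ≠ counts.getD p.2 0 then PySem.Set.add (PySem.Set.add s p.1) p.2 else s)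
    ([] : List Char)
  (['"', '`']).foldl
    (fun s q => if PySem.Int.mod (counts.getD q 0) 2 = 1 then PySem.Set.add s q else s) s1

def remove_unwanted_characters_alt (genome : String) : String :=
  let counts := pvCounts genome.toList
  let delete := pvDelete counts
  String.ofList (genome.toList.filter (fun ch => !(delete.contains ch)))

-- ===== PRECONDITION & SPEC =====
def Spec_remove_unwanted_characters (genome : String) (out : String) : Prop := out = remove_unwanted_characters_alt genome
instance (genome : String) (out : String) : Decidable (Spec_remove_unwanted_characters genome out) := by unfold Spec_remove_unwanted_characters; infer_instance

-- ===== CLAIM (what is proved, stated in full; the proofs are below) =====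
def Claim_equal_remove_unwanted_characters : Prop := ∀ (genome : String), Dom_remove_unwanted_characters genome → Spec_remove_unwanted_characters genome (remove_unwanted_characters genome)

-- ===== LEMMAS AND PROOFS =====

-- replacing a single character by '' is filtering it out
theorem pv_replace_go_single (c : Char) : ∀ (fuel : Nat) (l acc : List Char), l.length ≤ fuel →
    PySem.Chars.replace.go [c] [] fuel l acc = acc.reverse ++ l.filter (fun x => !(x == c)) := by
  intro fuel
  induction fuel with
  | zero => intro l acc h; cases l with
    | nil => simp [PySem.Chars.replace.go]
    | cons x t => simp at h
  | succ n ih =>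
    intro l acc h
    cases l with
    | nil => simp [PySem.Chars.replace.go]
    | cons x t =>
      have ht : t.length ≤ n := by simpa using Nat.le_of_succ_le_succ h
      by_cases hx : c = x
      · subst hx
        simp only [PySem.Chars.replace.go]
        rw [if_pos (by simp [List.isPrefixOf])]
        simpa using ih t acc ht
      · have hx1 : (c == x) = false := by simpa using hx
        have hx2 : (x == c) = false := by simpa using Ne.symm hx
        simp only [PySem.Chars.replace.go]
        rw [if_neg (by simp [List.isPrefixOf, hx1])]
        simpa [hx2] using ih t (x :: acc) ht

theorem pv_replace_single (g : List Char) (c : Char) :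
    PySem.Chars.replace g [c] [] = g.filter (fun x => !(x == c)) := by
  simpa [PySem.Chars.replace] using pv_replace_go_single c g.length g [] le_rfl

-- counting a single-character substring is counting the character
theorem pv_count_go_single (c : Char) : ∀ (fuel : Nat) (l : List Char) (acc : Nat), l.length ≤ fuel →
    PySem.Chars.count.go [c] fuel l acc = acc + l.count c := by
  intro fuel
  induction fuel with
  | zero => intro l acc h; cases l with
    | nil => simp [PySem.Chars.count.go]
    | cons x t => simp at h
  | succ n ih =>
    intro l acc h
    cases l with
    | nil => simp [PySem.Chars.count.go]
    | cons x t =>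
      have ht : t.length ≤ n := by simpa using Nat.le_of_succ_le_succ h
      by_cases hx : c = x
      · subst hx
        simp only [PySem.Chars.count.go]
        rw [if_pos (by simp [List.isPrefixOf])]
        simp only [List.length_cons, List.length_nil, Nat.zero_add, List.drop_succ_cons,
          List.drop_zero]
        rw [ih t (acc + 1) ht]
        simp
        omega
      · have hx1 : (c == x) = false := by simpa using hx
        have hx2 : (x == c) = false := by simpa using Ne.symm hx
        simp only [PySem.Chars.count.go]
        rw [if_neg (by simp [List.isPrefixOf, hx1])]
        rw [ih t acc ht]
        simp [List.count_cons, hx2]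

theorem pv_count_single (g : List Char) (c : Char) :
    PySem.Chars.count g [c] = g.count c := by
  simpa [PySem.Chars.count] using pv_count_go_single c g.length g 0 le_rfl

theorem pv_counts_getD (g : List Char) (c : Char) :
    (pvCounts g).getD c 0 = (g.count c : Int) := by
  simp [pvCounts, PySem.Dict.getD_foldl_insert_add_one]

theorem pv_count_filter (g : List Char) (c : Char) (p : Char → Bool) (h : p c = true) :
    (g.filter p).count c = g.count c :=
  List.count_filter h

theorem pv_cast_mod_two (n : Nat) : ((n : Int) % 2 = 1) ↔ n % 2 = 1 := by omega

set_option maxHeartbeats 2000000 in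
theorem pv_list_main (g : List Char) :
    pvClosingStrings.foldl pvStepA g = g.filter (fun ch => !((pvDelete (pvCounts g)).contains ch)) := by
  by_cases h1 : g.count '[' = g.count ']' <;>
  by_cases h2 : g.count '{' = g.count '}' <;>
  by_cases h3 : g.count '(' = g.count ')' <;>
  by_cases h4 : g.count '"' % 2 = 1 <;>
  by_cases h5 : g.count '<' = g.count '>' <;>
  by_cases h6 : g.count '`' % 2 = 1 <;>
  simp [pvClosingStrings, pvStepA, pvDelete, pv_counts_getD, pv_cast_mod_two,
        pv_count_single, pv_replace_single, pv_count_filter, PySem.Set.add,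
        PySem.List.pyGetD, PySem.List.pyGet?, PySem.List.pyIdx?,
        h1, h2, h3, h4, h5, h6, List.filter_filter, Bool.beq_eq_decide_eq,
        Bool.and_assoc, Bool.and_comm, Bool.and_left_comm]

-- ===== VERDICT (by name: the statement is the Claim_ definition above) =====
theorem remove_unwanted_characters_spec : Claim_equal_remove_unwanted_characters := by
  intro genome _
  unfold Spec_remove_unwanted_characters remove_unwanted_characters remove_unwanted_characters_alt
  rw [pv_list_main]
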